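-- pv_equiv track=rewrite | github.com/ParkJaechang/Coil-Analyzing | src/coil_analyzer/io/data_loader.py | infer_column_roles
-- ===== SOURCE A (Python) =====
-- ROLE_HINTS = {
--     "time": ("time", "timestamp", "sec", "ms"),
--     "voltage": ("voltage", "volt", "vout", "coil_v", "vcoil", "diff"),
--     "current": ("current", "curr", "icoil", "coil_i", "shunt"),
--     "magnetic": ("field", "gauss", "tesla", "hall", "bx", "by", "bz", "mt"),
-- }
--
-- def infer_column_roles(columns: list[str]) -> dict[str, list[str]]:
--     guesses: dict[str, list[str]] = {"time": [], "voltage": [], "current": [], "magnetic": []}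
--     for column in columns:
--         lowered = column.lower()
--         for role, hints in ROLE_HINTS.items():
--             if any(hint in lowered for hint in hints):
--                 guesses[role].append(column)
--         if lowered.endswith("_a") or lowered.endswith(" a"):
--             guesses["current"].append(column)
--         if "b" == lowered.strip():
--             guesses["magnetic"].append(column)
--     for role in guesses:
--         guesses[role] = _dedupe_preserve_order(_sort_role_candidates(role, guesses[role]))
--     return guesses
--
-- def _sort_role_candidates(role: str, candidates: list[str]) -> list[str]:
--     def score(column: str) -> tuple[int, int]:
--         lowered = column.lower()
--         peak_penalty = 1 if "peak" in lowered else 0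
--         if role == "current":
--             preferred = 0 if lowered.startswith("current") else 1
--             return (peak_penalty, preferred)
--         if role == "voltage":
--             preferred = 0 if lowered.startswith("voltage") else 1
--             return (peak_penalty, preferred)
--         if role == "magnetic":
--             hall_priority = 0 if lowered.startswith("hall") else 1
--             return (peak_penalty, hall_priority)
--         return (0, 0)
--
--     return sorted(candidates, key=score)
--
-- def _dedupe_preserve_order(items: list[str]) -> list[str]:
--     seen: set[str] = set()
--     output: list[str] = []
--     for item in items:
--         if item in seen:
--             continue
--         seen.add(item)
--         output.append(item)
--     return output
-- ===== SOURCE B (Python) =====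
-- TIME_HINTS = ("time", "timestamp", "sec", "ms")
-- VOLTAGE_HINTS = ("voltage", "volt", "vout", "coil_v", "vcoil", "diff")
-- CURRENT_HINTS = ("current", "curr", "icoil", "coil_i", "shunt")
-- MAGNETIC_HINTS = ("field", "gauss", "tesla", "hall", "bx", "by", "bz", "mt")
--
--
-- def infer_column_roles(columns: list[str]) -> dict[str, list[str]]:
--     # One pass: classify each column and drop it straight into the ordered
--     # sub-bucket for its (peak-penalty, preferred) score; no comparison sort.
--     t = []
--     v = [[], [], [], []]
--     c = [[], [], [], []]
--     m = [[], [], [], []]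
--     for col in columns:
--         low = col.lower()
--         peak = 2 if "peak" in low else 0
--         vi = peak + (0 if low.startswith("voltage") else 1)
--         ci = peak + (0 if low.startswith("current") else 1)
--         mi = peak + (0 if low.startswith("hall") else 1)
--         if any(h in low for h in TIME_HINTS):
--             t.append(col)
--         if any(h in low for h in VOLTAGE_HINTS):
--             v[vi].append(col)
--         if any(h in low for h in CURRENT_HINTS):
--             c[ci].append(col)
--         if low.endswith("_a") or low.endswith(" a"):
--             c[ci].append(col)
--         if any(h in low for h in MAGNETIC_HINTS):
--             m[mi].append(col)
--         if low.strip() == "b":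
--             m[mi].append(col)
--
--     def dd(xs):
--         return list(dict.fromkeys(xs))
--
--     return {
--         "time": dd(t),
--         "voltage": dd(v[0] + v[1] + v[2] + v[3]),
--         "current": dd(c[0] + c[1] + c[2] + c[3]),
--         "magnetic": dd(m[0] + m[1] + m[2] + m[3]),
--     }
-- ===== Notes on version B (the rewrite author's own statement) =====
-- stated objective: alternative
-- what changed: B replaces A's per-role stable comparison sort plus set-based dedupe pass with a single pass that drops each column directly into an ordered sub-bucket per role keyed by its (peak-penalty, preferred) score, concatenating the buckets and deduping via dict.fromkeys at the end.
import Mathlib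
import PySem

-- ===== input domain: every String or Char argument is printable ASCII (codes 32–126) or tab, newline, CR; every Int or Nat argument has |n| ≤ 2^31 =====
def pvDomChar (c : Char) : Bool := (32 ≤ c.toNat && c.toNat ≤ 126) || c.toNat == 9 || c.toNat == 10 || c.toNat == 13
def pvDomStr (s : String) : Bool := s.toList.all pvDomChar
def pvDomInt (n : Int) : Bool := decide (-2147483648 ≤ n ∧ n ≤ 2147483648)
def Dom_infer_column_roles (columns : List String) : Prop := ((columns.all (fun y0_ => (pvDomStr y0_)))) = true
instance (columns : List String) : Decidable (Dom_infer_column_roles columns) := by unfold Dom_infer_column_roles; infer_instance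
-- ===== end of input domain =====

-- B fuses classification and ordering into one pass over the columns, dropping each
-- column into a per-role ordered sub-bucket keyed by its (peak-penalty, preferred)
-- score, so A's separate stable comparison sort disappears (objective: alternative).

-- ===== PORT A =====
def pvRoleHints : List (String × List String) :=
  [("time", ["time", "timestamp", "sec", "ms"]),
   ("voltage", ["voltage", "volt", "vout", "coil_v", "vcoil", "diff"]),
   ("current", ["current", "curr", "icoil", "coil_i", "shunt"]),
   ("magnetic", ["field", "gauss", "tesla", "hall", "bx", "by", "bz", "mt"])]

def pvScoreA (role : String) (column : String) : Int × Int :=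
  let lowered := PySem.Str.lower column
  let peak_penalty : Int := if PySem.Str.isIn "peak" lowered then 1 else 0
  if role == "current" then
    (peak_penalty, if PySem.Str.startswith lowered "current" then 0 else 1)
  else if role == "voltage" then
    (peak_penalty, if PySem.Str.startswith lowered "voltage" then 0 else 1)
  else if role == "magnetic" then
    (peak_penalty, if PySem.Str.startswith lowered "hall" then 0 else 1)
  else (0, 0)

def pvSortRoleA (role : String) (candidates : List String) : List String :=
  PySem.List.sorted2 candidates (fun c => (pvScoreA role c).1) (fun c => (pvScoreA role c).2)

def pvDedupeA (items : List String) : List String :=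
  (items.foldl
    (fun (st : PySem.Set String × List String) item =>
      if st.1.contains item then st else (st.1.add item, st.2 ++ [item]))
    ((PySem.Set.empty : PySem.Set String), ([] : List String))).2

-- body of the inner `for role, hints in ROLE_HINTS.items()` loop of A
def pvRoleStepA (lowered column : String) (g : PySem.Dict String (List String))
    (rh : String × List String) : PySem.Dict String (List String) :=
  if rh.2.any (fun hint => PySem.Str.isIn hint lowered) then
    g.modify rh.1 [] (fun l => l ++ [column])
  else g

-- body of A's main `for column in columns` loop
def pvStepA (g : PySem.Dict String (List String)) (column : String) : PySem.Dict String (List String) :=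
  let lowered := PySem.Str.lower column
  let g := pvRoleHints.foldl (pvRoleStepA lowered column) g
  let g := if PySem.Str.endswith lowered "_a" || PySem.Str.endswith lowered " a" then
      g.modify "current" [] (fun l => l ++ [column]) else g
  if PySem.Str.strip lowered == "b" then
    g.modify "magnetic" [] (fun l => l ++ [column]) else g

def infer_column_roles (columns : List String) : List (String × List String) :=
  let guesses : PySem.Dict String (List String) :=
    ⟨[("time", []), ("voltage", []), ("current", []), ("magnetic", [])]⟩
  let guesses := columns.foldl pvStepA guesses
  let guesses := guesses.keys.foldl (fun g role =>
      g.insert role (pvDedupeA (pvSortRoleA role (g.getD role [])))) guesses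
  guesses.items

-- ===== PORT B =====
def pvTimeHints : List String := ["time", "timestamp", "sec", "ms"]
def pvVoltageHints : List String := ["voltage", "volt", "vout", "coil_v", "vcoil", "diff"]
def pvCurrentHints : List String := ["current", "curr", "icoil", "coil_i", "shunt"]
def pvMagneticHints : List String := ["field", "gauss", "tesla", "hall", "bx", "by", "bz", "mt"]

-- any(h in col.lower() for h in hints)
def pvMatch (hints : List String) (c : String) : Bool :=
  hints.any (fun h => PySem.Str.isIn h (PySem.Str.lower c))
-- low.endswith("_a") or low.endswith(" a")
def pvSuffA (c : String) : Bool :=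
  PySem.Str.endswith (PySem.Str.lower c) "_a" || PySem.Str.endswith (PySem.Str.lower c) " a"
-- low.strip() == "b"
def pvStripB (c : String) : Bool := PySem.Str.strip (PySem.Str.lower c) == "b"
-- peak = 2 if "peak" in low else 0
def pvPeakB (c : String) : Nat := if PySem.Str.isIn "peak" (PySem.Str.lower c) then 2 else 0
-- vi / ci / mi
def pvIdxV (c : String) : Nat :=
  pvPeakB c + (if PySem.Str.startswith (PySem.Str.lower c) "voltage" then 0 else 1)
def pvIdxC (c : String) : Nat :=
  pvPeakB c + (if PySem.Str.startswith (PySem.Str.lower c) "current" then 0 else 1)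
def pvIdxM (c : String) : Nat :=
  pvPeakB c + (if PySem.Str.startswith (PySem.Str.lower c) "hall" then 0 else 1)

structure PVQ where
  b0 : List String
  b1 : List String
  b2 : List String
  b3 : List String
deriving Repr, DecidableEq

-- v[i].append(col) on the 4-bucket array
def PVQ.add (q : PVQ) (i : Nat) (x : String) : PVQ :=
  if i == 0 then { q with b0 := q.b0 ++ [x] }
  else if i == 1 then { q with b1 := q.b1 ++ [x] }
  else if i == 2 then { q with b2 := q.b2 ++ [x] }
  else { q with b3 := q.b3 ++ [x] }

-- v[0] + v[1] + v[2] + v[3]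
def PVQ.cat (q : PVQ) : List String := q.b0 ++ q.b1 ++ q.b2 ++ q.b3

structure PVSt where
  t : List String
  v : PVQ
  c : PVQ
  m : PVQ
deriving Repr, DecidableEq

-- the six conditional appends of B's loop body, after the flags and indices are computed
def pvApplyB (st : PVSt) (col : String) (bT bV bC bA bM bB : Bool) (vi ci mi : Nat) : PVSt :=
  let st := if bT then { st with t := st.t ++ [col] } else st
  let st := if bV then { st with v := st.v.add vi col } else st
  let st := if bC then { st with c := st.c.add ci col } else st
  let st := if bA then { st with c := st.c.add ci col } else st
  let st := if bM then { st with m := st.m.add mi col } else st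
  if bB then { st with m := st.m.add mi col } else st

-- body of B's `for col in columns` loop
def pvStepB (st : PVSt) (col : String) : PVSt :=
  pvApplyB st col (pvMatch pvTimeHints col) (pvMatch pvVoltageHints col)
    (pvMatch pvCurrentHints col) (pvSuffA col) (pvMatch pvMagneticHints col) (pvStripB col)
    (pvIdxV col) (pvIdxC col) (pvIdxM col)

def infer_column_roles_alt (columns : List String) : List (String × List String) :=
  let st := columns.foldl pvStepB ⟨[], ⟨[], [], [], []⟩, ⟨[], [], [], []⟩, ⟨[], [], [], []⟩⟩
  [("time", PySem.List.dedup st.t),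
   ("voltage", PySem.List.dedup st.v.cat),
   ("current", PySem.List.dedup st.c.cat),
   ("magnetic", PySem.List.dedup st.m.cat)]

-- ===== PRECONDITION & SPEC =====
def Spec_infer_column_roles (columns : List String) (out : List (String × List String)) : Prop := out = infer_column_roles_alt columns
instance (columns : List String) (out : List (String × List String)) : Decidable (Spec_infer_column_roles columns out) := by unfold Spec_infer_column_roles; infer_instance

-- ===== CLAIM (what is proved, stated in full; the proofs are below) =====
def Claim_equal_infer_column_roles : Prop := ∀ (columns : List String), Dom_infer_column_roles columns → Spec_infer_column_roles columns (infer_column_roles columns)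

-- ===== LEMMAS AND PROOFS =====

-- per-column contributions and the per-role raw / bucket lists
def pvOneT (c : String) : List String := if pvMatch pvTimeHints c then [c] else []
def pvOneV (j : Nat) (c : String) : List String :=
  if pvMatch pvVoltageHints c && (pvIdxV c == j) then [c] else []
def pvOneC (j : Nat) (c : String) : List String :=
  if pvIdxC c == j then
    (if pvMatch pvCurrentHints c then [c] else []) ++ (if pvSuffA c then [c] else []) else []
def pvOneM (j : Nat) (c : String) : List String :=
  if pvIdxM c == j then
    (if pvMatch pvMagneticHints c then [c] else []) ++ (if pvStripB c then [c] else []) else []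

def pvRawT (cs : List String) : List String := cs.filter (pvMatch pvTimeHints)
def pvRawV (cs : List String) : List String := cs.filter (pvMatch pvVoltageHints)
def pvRawC (cs : List String) : List String :=
  cs.flatMap (fun c => (if pvMatch pvCurrentHints c then [c] else []) ++ (if pvSuffA c then [c] else []))
def pvRawM (cs : List String) : List String :=
  cs.flatMap (fun c => (if pvMatch pvMagneticHints c then [c] else []) ++ (if pvStripB c then [c] else []))

def pvBktV (j : Nat) (cs : List String) : List String := cs.flatMap (pvOneV j)
def pvBktC (j : Nat) (cs : List String) : List String := cs.flatMap (pvOneC j)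
def pvBktM (j : Nat) (cs : List String) : List String := cs.flatMap (pvOneM j)

theorem pvPVSt_ext (a b : PVSt) (h1 : a.t = b.t) (h2 : a.v = b.v) (h3 : a.c = b.c) (h4 : a.m = b.m) : a = b := by
  cases a; cases b; simp_all

theorem pvPVQ_ext (a b : PVQ) (h1 : a.b0 = b.b0) (h2 : a.b1 = b.b1) (h3 : a.b2 = b.b2) (h4 : a.b3 = b.b3) : a = b := by
  cases a; cases b; simp_all

theorem pvPVQ_condAdd (q : PVQ) (b : Bool) (i : Nat) (hi : i ≤ 3) (x : String) :
    (if b then q.add i x else q) =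
      ⟨q.b0 ++ (if b && (i == 0) then [x] else []), q.b1 ++ (if b && (i == 1) then [x] else []),
       q.b2 ++ (if b && (i == 2) then [x] else []), q.b3 ++ (if b && (i == 3) then [x] else [])⟩ := by
  cases b <;> interval_cases i <;> simp [PVQ.add]

theorem pvPVQ_condAdd2 (q : PVQ) (b1 b2 : Bool) (i : Nat) (hi : i ≤ 3) (x : String) :
    (if b2 then (if b1 then q.add i x else q).add i x else (if b1 then q.add i x else q)) =
      ⟨q.b0 ++ (if i == 0 then (if b1 then [x] else []) ++ (if b2 then [x] else []) else []),
       q.b1 ++ (if i == 1 then (if b1 then [x] else []) ++ (if b2 then [x] else []) else []),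
       q.b2 ++ (if i == 2 then (if b1 then [x] else []) ++ (if b2 then [x] else []) else []),
       q.b3 ++ (if i == 3 then (if b1 then [x] else []) ++ (if b2 then [x] else []) else [])⟩ := by
  cases b1 <;> cases b2 <;> interval_cases i <;> simp [PVQ.add]

theorem pvIdxV_le (c : String) : pvIdxV c ≤ 3 := by
  unfold pvIdxV pvPeakB; split_ifs <;> omega
theorem pvIdxC_le (c : String) : pvIdxC c ≤ 3 := by
  unfold pvIdxC pvPeakB; split_ifs <;> omega
theorem pvIdxM_le (c : String) : pvIdxM c ≤ 3 := by
  unfold pvIdxM pvPeakB; split_ifs <;> omega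

theorem pvApplyB_t (st : PVSt) (col : String) (bT bV bC bA bM bB : Bool) (vi ci mi : Nat) :
    (pvApplyB st col bT bV bC bA bM bB vi ci mi).t = if bT then st.t ++ [col] else st.t := by
  cases bT <;> cases bV <;> cases bC <;> cases bA <;> cases bM <;> cases bB <;> rfl

theorem pvApplyB_v (st : PVSt) (col : String) (bT bV bC bA bM bB : Bool) (vi ci mi : Nat) :
    (pvApplyB st col bT bV bC bA bM bB vi ci mi).v = if bV then st.v.add vi col else st.v := by
  cases bT <;> cases bV <;> cases bC <;> cases bA <;> cases bM <;> cases bB <;> rfl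

theorem pvApplyB_c (st : PVSt) (col : String) (bT bV bC bA bM bB : Bool) (vi ci mi : Nat) :
    (pvApplyB st col bT bV bC bA bM bB vi ci mi).c =
      (if bA then (if bC then st.c.add ci col else st.c).add ci col
       else (if bC then st.c.add ci col else st.c)) := by
  cases bT <;> cases bV <;> cases bC <;> cases bA <;> cases bM <;> cases bB <;> rfl

theorem pvApplyB_m (st : PVSt) (col : String) (bT bV bC bA bM bB : Bool) (vi ci mi : Nat) :
    (pvApplyB st col bT bV bC bA bM bB vi ci mi).m =
      (if bB then (if bM then st.m.add mi col else st.m).add mi col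
       else (if bM then st.m.add mi col else st.m)) := by
  cases bT <;> cases bV <;> cases bC <;> cases bA <;> cases bM <;> cases bB <;> rfl

-- one step of B's loop, fieldwise
theorem pvStepB_eq (t : List String) (v0 v1 v2 v3 c0 c1 c2 c3 m0 m1 m2 m3 : List String) (col : String) :
    pvStepB ⟨t, ⟨v0, v1, v2, v3⟩, ⟨c0, c1, c2, c3⟩, ⟨m0, m1, m2, m3⟩⟩ col =
      ⟨t ++ pvOneT col,
       ⟨v0 ++ pvOneV 0 col, v1 ++ pvOneV 1 col, v2 ++ pvOneV 2 col, v3 ++ pvOneV 3 col⟩,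
       ⟨c0 ++ pvOneC 0 col, c1 ++ pvOneC 1 col, c2 ++ pvOneC 2 col, c3 ++ pvOneC 3 col⟩,
       ⟨m0 ++ pvOneM 0 col, m1 ++ pvOneM 1 col, m2 ++ pvOneM 2 col, m3 ++ pvOneM 3 col⟩⟩ := by
  apply pvPVSt_ext
  · rw [pvStepB, pvApplyB_t]
    unfold pvOneT
    split <;> simp
  · rw [pvStepB, pvApplyB_v, pvPVQ_condAdd _ _ _ (pvIdxV_le col) col]
    apply pvPVQ_ext <;> rfl
  · rw [pvStepB, pvApplyB_c, pvPVQ_condAdd2 _ _ _ _ (pvIdxC_le col) col]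
    apply pvPVQ_ext <;> rfl
  · rw [pvStepB, pvApplyB_m, pvPVQ_condAdd2 _ _ _ _ (pvIdxM_le col) col]
    apply pvPVQ_ext <;> rfl

-- B's loop, characterised
theorem pvLoopB (cs : List String) : ∀ (t v0 v1 v2 v3 c0 c1 c2 c3 m0 m1 m2 m3 : List String),
    cs.foldl pvStepB ⟨t, ⟨v0, v1, v2, v3⟩, ⟨c0, c1, c2, c3⟩, ⟨m0, m1, m2, m3⟩⟩ =
      ⟨t ++ pvRawT cs,
       ⟨v0 ++ pvBktV 0 cs, v1 ++ pvBktV 1 cs, v2 ++ pvBktV 2 cs, v3 ++ pvBktV 3 cs⟩,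
       ⟨c0 ++ pvBktC 0 cs, c1 ++ pvBktC 1 cs, c2 ++ pvBktC 2 cs, c3 ++ pvBktC 3 cs⟩,
       ⟨m0 ++ pvBktM 0 cs, m1 ++ pvBktM 1 cs, m2 ++ pvBktM 2 cs, m3 ++ pvBktM 3 cs⟩⟩ := by
  induction cs with
  | nil => intro t v0 v1 v2 v3 c0 c1 c2 c3 m0 m1 m2 m3
           simp [pvRawT, pvBktV, pvBktC, pvBktM]
  | cons a cs ih =>
    intro t v0 v1 v2 v3 c0 c1 c2 c3 m0 m1 m2 m3
    rw [List.foldl_cons, pvStepB_eq, ih]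
    apply pvPVSt_ext <;>
      first
      | (simp [pvRawT, pvOneT, List.filter_cons]; split_ifs <;> simp)
      | (apply pvPVQ_ext <;> simp [pvBktV, pvBktC, pvBktM, List.flatMap_cons, List.append_assoc])

-- evaluating the inner role loop of A on the four-key dict
theorem pvRoleStepA_time (low col : String) (hs : List String) (t v c m : List String) :
    pvRoleStepA low col ⟨[("time", t), ("voltage", v), ("current", c), ("magnetic", m)]⟩ ("time", hs) =
      ⟨[("time", t ++ (if hs.any (fun h => PySem.Str.isIn h low) then [col] else [])),
        ("voltage", v), ("current", c), ("magnetic", m)]⟩ := by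
  simp only [pvRoleStepA, PySem.Dict.modify, PySem.Dict.insert, PySem.Dict.getD,
    PySem.Dict.get?, PySem.Dict.contains]
  split <;> simp_all

theorem pvRoleStepA_voltage (low col : String) (hs : List String) (t v c m : List String) :
    pvRoleStepA low col ⟨[("time", t), ("voltage", v), ("current", c), ("magnetic", m)]⟩ ("voltage", hs) =
      ⟨[("time", t), ("voltage", v ++ (if hs.any (fun h => PySem.Str.isIn h low) then [col] else [])),
        ("current", c), ("magnetic", m)]⟩ := by
  simp only [pvRoleStepA, PySem.Dict.modify, PySem.Dict.insert, PySem.Dict.getD,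
    PySem.Dict.get?, PySem.Dict.contains]
  split <;> simp_all

theorem pvRoleStepA_current (low col : String) (hs : List String) (t v c m : List String) :
    pvRoleStepA low col ⟨[("time", t), ("voltage", v), ("current", c), ("magnetic", m)]⟩ ("current", hs) =
      ⟨[("time", t), ("voltage", v),
        ("current", c ++ (if hs.any (fun h => PySem.Str.isIn h low) then [col] else [])),
        ("magnetic", m)]⟩ := by
  simp only [pvRoleStepA, PySem.Dict.modify, PySem.Dict.insert, PySem.Dict.getD,
    PySem.Dict.get?, PySem.Dict.contains]
  split <;> simp_all

theorem pvRoleStepA_magnetic (low col : String) (hs : List String) (t v c m : List String) :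
    pvRoleStepA low col ⟨[("time", t), ("voltage", v), ("current", c), ("magnetic", m)]⟩ ("magnetic", hs) =
      ⟨[("time", t), ("voltage", v), ("current", c),
        ("magnetic", m ++ (if hs.any (fun h => PySem.Str.isIn h low) then [col] else []))]⟩ := by
  simp only [pvRoleStepA, PySem.Dict.modify, PySem.Dict.insert, PySem.Dict.getD,
    PySem.Dict.get?, PySem.Dict.contains]
  split <;> simp_all

theorem pvModA_current (t v c m : List String) (col : String) :
    (PySem.Dict.modify ⟨[("time", t), ("voltage", v), ("current", c), ("magnetic", m)]⟩
        "current" [] (fun l => l ++ [col])) =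
      ⟨[("time", t), ("voltage", v), ("current", c ++ [col]), ("magnetic", m)]⟩ := by
  simp [PySem.Dict.modify, PySem.Dict.insert, PySem.Dict.getD, PySem.Dict.get?, PySem.Dict.contains]

theorem pvModA_magnetic (t v c m : List String) (col : String) :
    (PySem.Dict.modify ⟨[("time", t), ("voltage", v), ("current", c), ("magnetic", m)]⟩
        "magnetic" [] (fun l => l ++ [col])) =
      ⟨[("time", t), ("voltage", v), ("current", c), ("magnetic", m ++ [col])]⟩ := by
  simp [PySem.Dict.modify, PySem.Dict.insert, PySem.Dict.getD, PySem.Dict.get?, PySem.Dict.contains]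

-- one step of A's loop, fieldwise (conditions kept in A's shape)
set_option maxHeartbeats 1600000 in
theorem pvStepA_eq (t v c m : List String) (col : String) :
    pvStepA ⟨[("time", t), ("voltage", v), ("current", c), ("magnetic", m)]⟩ col =
      ⟨[("time", t ++ (if (["time", "timestamp", "sec", "ms"] : List String).any
            (fun hint => PySem.Str.isIn hint (PySem.Str.lower col)) then [col] else [])),
        ("voltage", v ++ (if (["voltage", "volt", "vout", "coil_v", "vcoil", "diff"] : List String).any
            (fun hint => PySem.Str.isIn hint (PySem.Str.lower col)) then [col] else [])),
        ("current", c ++ ((if (["current", "curr", "icoil", "coil_i", "shunt"] : List String).any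
            (fun hint => PySem.Str.isIn hint (PySem.Str.lower col)) then [col] else []) ++
          (if PySem.Str.endswith (PySem.Str.lower col) "_a" || PySem.Str.endswith (PySem.Str.lower col) " a"
            then [col] else []))),
        ("magnetic", m ++ ((if (["field", "gauss", "tesla", "hall", "bx", "by", "bz", "mt"] : List String).any
            (fun hint => PySem.Str.isIn hint (PySem.Str.lower col)) then [col] else []) ++
          (if PySem.Str.strip (PySem.Str.lower col) == "b" then [col] else [])))]⟩ := by
  rw [pvStepA]
  simp only [pvRoleHints, List.foldl_cons, List.foldl_nil,
    pvRoleStepA_time, pvRoleStepA_voltage, pvRoleStepA_current, pvRoleStepA_magnetic]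
  split_ifs <;> simp [pvModA_current, pvModA_magnetic, List.append_assoc]

-- A's loop, characterised
theorem pvLoopA (cs : List String) : ∀ (t v c m : List String),
    cs.foldl pvStepA ⟨[("time", t), ("voltage", v), ("current", c), ("magnetic", m)]⟩ =
      ⟨[("time", t ++ pvRawT cs), ("voltage", v ++ pvRawV cs),
        ("current", c ++ pvRawC cs), ("magnetic", m ++ pvRawM cs)]⟩ := by
  induction cs with
  | nil => intro t v c m; simp [pvRawT, pvRawV, pvRawC, pvRawM]
  | cons a cs ih =>
    intro t v c m
    rw [List.foldl_cons, pvStepA_eq, ih]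
    simp only [pvRawT, pvRawV, pvRawC, pvRawM, pvMatch, pvSuffA, pvStripB,
      pvTimeHints, pvVoltageHints, pvCurrentHints, pvMagneticHints,
      List.filter_cons, List.flatMap_cons]
    split_ifs <;> simp [List.append_assoc]

-- A's dedupe loop is ordered dedup
theorem pvDedupeA_loop (l : List String) : ∀ (s : List String),
    l.foldl (fun (st : PySem.Set String × List String) item =>
        if st.1.contains item then st else (st.1.add item, st.2 ++ [item])) (s, s) =
      (l.foldl PySem.Set.add s, l.foldl PySem.Set.add s) := by
  induction l with
  | nil => intro s; rfl
  | cons a l ih =>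
    intro s
    simp only [List.foldl_cons]
    by_cases h : PySem.Set.contains s a = true
    · rw [if_pos h, show PySem.Set.add s a = s from by simp only [PySem.Set.add]; rw [if_pos h], ih]
    · rw [if_neg h, show PySem.Set.add s a = s ++ [a] from by simp only [PySem.Set.add]; rw [if_neg h]]
      exact ih (s ++ [a])

theorem pvDedupeA_eq (l : List String) : pvDedupeA l = PySem.List.dedup l := by
  rw [pvDedupeA]
  have := pvDedupeA_loop l []
  rw [show ((PySem.Set.empty : PySem.Set String), ([] : List String)) = (([] : List String), ([] : List String)) from rfl]
  rw [this]
  rfl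

theorem pvInsertBy_skip {α : Type} (before : α → α → Bool) (x : α) (l1 l2 : List α)
    (h : ∀ y ∈ l1, before x y = false) :
    PySem.List.insertBy before x (l1 ++ l2) = l1 ++ PySem.List.insertBy before x l2 := by
  induction l1 with
  | nil => rfl
  | cons a l ih =>
    rw [List.cons_append, PySem.List.insertBy, h a (by simp), if_neg (by simp),
      ih (fun y hy => h y (List.mem_cons_of_mem _ hy)), List.cons_append]

theorem pvInsertBy_all {α : Type} (before : α → α → Bool) (x : α) (l : List α)
    (h : ∀ y ∈ l, before x y = true) :
    PySem.List.insertBy before x l = x :: l := by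
  cases l with
  | nil => rfl
  | cons a l => rw [PySem.List.insertBy, h a (by simp), if_pos rfl]

-- stable sort with 0/1-valued tuple keys is a bucket partition
theorem pvSorted2_buckets {α : Type} (k1 k2 : α → Int)
    (h1 : ∀ x, k1 x = 0 ∨ k1 x = 1) (h2 : ∀ x, k2 x = 0 ∨ k2 x = 1) (xs : List α) :
    PySem.List.sorted2 xs k1 k2 =
      xs.filter (fun x => k1 x == 0 && k2 x == 0) ++ xs.filter (fun x => k1 x == 0 && k2 x == 1)
      ++ xs.filter (fun x => k1 x == 1 && k2 x == 0) ++ xs.filter (fun x => k1 x == 1 && k2 x == 1) := by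
  induction xs using List.reverseRecOn with
  | nil => rfl
  | append_singleton xs x ih =>
    have hfold : PySem.List.sorted2 (xs ++ [x]) k1 k2
        = PySem.List.insertBy (fun a b => decide (k1 a < k1 b) || (!decide (k1 b < k1 a) && decide (k2 a < k2 b))) x (PySem.List.sorted2 xs k1 k2) := by
      simp [PySem.List.sorted2, List.foldl_append]
    rw [hfold, ih]
    set before := fun a b => decide (k1 a < k1 b) || (!decide (k1 b < k1 a) && decide (k2 a < k2 b)) with hb
    have mem00 : ∀ y ∈ xs.filter (fun x => k1 x == 0 && k2 x == 0), k1 y = 0 ∧ k2 y = 0 := by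
      intro y hy; have := (List.mem_filter.mp hy).2; simp at this; omega
    have mem01 : ∀ y ∈ xs.filter (fun x => k1 x == 0 && k2 x == 1), k1 y = 0 ∧ k2 y = 1 := by
      intro y hy; have := (List.mem_filter.mp hy).2; simp at this; omega
    have mem10 : ∀ y ∈ xs.filter (fun x => k1 x == 1 && k2 x == 0), k1 y = 1 ∧ k2 y = 0 := by
      intro y hy; have := (List.mem_filter.mp hy).2; simp at this; omega
    have mem11 : ∀ y ∈ xs.filter (fun x => k1 x == 1 && k2 x == 1), k1 y = 1 ∧ k2 y = 1 := by
      intro y hy; have := (List.mem_filter.mp hy).2; simp at this; omega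
    rcases h1 x with hx1 | hx1 <;> rcases h2 x with hx2 | hx2
    · -- key (0,0): insert at end of bucket 00
      rw [show xs.filter (fun x => k1 x == 0 && k2 x == 0) ++ xs.filter (fun x => k1 x == 0 && k2 x == 1)
            ++ xs.filter (fun x => k1 x == 1 && k2 x == 0) ++ xs.filter (fun x => k1 x == 1 && k2 x == 1)
          = xs.filter (fun x => k1 x == 0 && k2 x == 0) ++ (xs.filter (fun x => k1 x == 0 && k2 x == 1)
            ++ xs.filter (fun x => k1 x == 1 && k2 x == 0) ++ xs.filter (fun x => k1 x == 1 && k2 x == 1)) by simp,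
        pvInsertBy_skip before x _ _ (by intro y hy; obtain ⟨a, b⟩ := mem00 y hy; simp [hb, hx1, hx2, a, b]),
        pvInsertBy_all before x _ (by
          intro y hy
          simp only [List.mem_append] at hy
          rcases hy with (hy | hy) | hy
          · obtain ⟨a, b⟩ := mem01 y hy; simp [hb, hx1, hx2, a, b]
          · obtain ⟨a, b⟩ := mem10 y hy; simp [hb, hx1, hx2, a, b]
          · obtain ⟨a, b⟩ := mem11 y hy; simp [hb, hx1, hx2, a, b])]
      simp [hx1, hx2]
    · -- key (0,1)
      rw [show xs.filter (fun x => k1 x == 0 && k2 x == 0) ++ xs.filter (fun x => k1 x == 0 && k2 x == 1)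
            ++ xs.filter (fun x => k1 x == 1 && k2 x == 0) ++ xs.filter (fun x => k1 x == 1 && k2 x == 1)
          = (xs.filter (fun x => k1 x == 0 && k2 x == 0) ++ xs.filter (fun x => k1 x == 0 && k2 x == 1))
            ++ (xs.filter (fun x => k1 x == 1 && k2 x == 0) ++ xs.filter (fun x => k1 x == 1 && k2 x == 1)) by simp,
        pvInsertBy_skip before x _ _ (by
          intro y hy
          simp only [List.mem_append] at hy
          rcases hy with hy | hy
          · obtain ⟨a, b⟩ := mem00 y hy; simp [hb, hx1, hx2, a, b]
          · obtain ⟨a, b⟩ := mem01 y hy; simp [hb, hx1, hx2, a, b]),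
        pvInsertBy_all before x _ (by
          intro y hy
          simp only [List.mem_append] at hy
          rcases hy with hy | hy
          · obtain ⟨a, b⟩ := mem10 y hy; simp [hb, hx1, hx2, a, b]
          · obtain ⟨a, b⟩ := mem11 y hy; simp [hb, hx1, hx2, a, b])]
      simp [hx1, hx2]
    · -- key (1,0)
      rw [show xs.filter (fun x => k1 x == 0 && k2 x == 0) ++ xs.filter (fun x => k1 x == 0 && k2 x == 1)
            ++ xs.filter (fun x => k1 x == 1 && k2 x == 0) ++ xs.filter (fun x => k1 x == 1 && k2 x == 1)
          = (xs.filter (fun x => k1 x == 0 && k2 x == 0) ++ xs.filter (fun x => k1 x == 0 && k2 x == 1)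
            ++ xs.filter (fun x => k1 x == 1 && k2 x == 0)) ++ xs.filter (fun x => k1 x == 1 && k2 x == 1) by simp,
        pvInsertBy_skip before x _ _ (by
          intro y hy
          simp only [List.mem_append] at hy
          rcases hy with (hy | hy) | hy
          · obtain ⟨a, b⟩ := mem00 y hy; simp [hb, hx1, hx2, a, b]
          · obtain ⟨a, b⟩ := mem01 y hy; simp [hb, hx1, hx2, a, b]
          · obtain ⟨a, b⟩ := mem10 y hy; simp [hb, hx1, hx2, a, b]),
        pvInsertBy_all before x _ (by
          intro y hy
          obtain ⟨a, b⟩ := mem11 y hy; simp [hb, hx1, hx2, a, b])]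
      simp [hx1, hx2]
    · -- key (1,1)
      rw [show xs.filter (fun x => k1 x == 0 && k2 x == 0) ++ xs.filter (fun x => k1 x == 0 && k2 x == 1)
            ++ xs.filter (fun x => k1 x == 1 && k2 x == 0) ++ xs.filter (fun x => k1 x == 1 && k2 x == 1)
          = (xs.filter (fun x => k1 x == 0 && k2 x == 0) ++ xs.filter (fun x => k1 x == 0 && k2 x == 1)
            ++ xs.filter (fun x => k1 x == 1 && k2 x == 0) ++ xs.filter (fun x => k1 x == 1 && k2 x == 1)) ++ [] by simp,
        pvInsertBy_skip before x _ _ (by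
          intro y hy
          simp only [List.mem_append] at hy
          rcases hy with ((hy | hy) | hy) | hy
          · obtain ⟨a, b⟩ := mem00 y hy; simp [hb, hx1, hx2, a, b]
          · obtain ⟨a, b⟩ := mem01 y hy; simp [hb, hx1, hx2, a, b]
          · obtain ⟨a, b⟩ := mem10 y hy; simp [hb, hx1, hx2, a, b]
          · obtain ⟨a, b⟩ := mem11 y hy; simp [hb, hx1, hx2, a, b])]
      simp [hx1, hx2, PySem.List.insertBy]

-- flatMap of an if-singleton is a filter
theorem pvFlatMap_single (p : String → Bool) (cs : List String) :
    cs.flatMap (fun c => if p c then [c] else []) = cs.filter p := by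
  induction cs with
  | nil => rfl
  | cons a l ih => by_cases h : p a <;> simp [h, ih]

-- sorting the "time" candidates is the identity (constant key)
theorem pvSortT (l : List String) : pvSortRoleA "time" l = l := by
  unfold pvSortRoleA
  rw [show (fun c => (pvScoreA "time" c).1) = (fun _ => (0 : Int)) from
      funext (fun c => by simp [pvScoreA]),
    show (fun c => (pvScoreA "time" c).2) = (fun _ => (0 : Int)) from
      funext (fun c => by simp [pvScoreA]),
    pvSorted2_buckets _ _ (fun _ => Or.inl rfl) (fun _ => Or.inl rfl)]
  simp

theorem pvFlatMap_congr {α β : Type} {f g : α → List β} (h : ∀ x, f x = g x) (cs : List α) :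
    cs.flatMap f = cs.flatMap g := by
  induction cs with
  | nil => rfl
  | cons a l ih => simp [List.flatMap_cons, h a, ih]

-- sorting the raw "voltage" candidates is bucket concatenation
theorem pvSortV (cs : List String) :
    pvSortRoleA "voltage" (pvRawV cs) = pvBktV 0 cs ++ pvBktV 1 cs ++ pvBktV 2 cs ++ pvBktV 3 cs := by
  have h0 : List.filter (fun x => (pvScoreA "voltage" x).1 == 0 && (pvScoreA "voltage" x).2 == 0) (pvRawV cs) = pvBktV 0 cs := by
    unfold pvRawV pvBktV pvOneV
    rw [pvFlatMap_single, List.filter_filter]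
    exact List.filter_congr (fun x _ => by
      by_cases hp : PySem.Str.isIn "peak" (PySem.Str.lower x) <;>
      by_cases hw : PySem.Str.startswith (PySem.Str.lower x) "voltage" <;>
        simp_all [pvScoreA, pvIdxV, pvPeakB])
  have h1 : List.filter (fun x => (pvScoreA "voltage" x).1 == 0 && (pvScoreA "voltage" x).2 == 1) (pvRawV cs) = pvBktV 1 cs := by
    unfold pvRawV pvBktV pvOneV
    rw [pvFlatMap_single, List.filter_filter]
    exact List.filter_congr (fun x _ => by
      by_cases hp : PySem.Str.isIn "peak" (PySem.Str.lower x) <;>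
      by_cases hw : PySem.Str.startswith (PySem.Str.lower x) "voltage" <;>
        simp_all [pvScoreA, pvIdxV, pvPeakB])
  have h2 : List.filter (fun x => (pvScoreA "voltage" x).1 == 1 && (pvScoreA "voltage" x).2 == 0) (pvRawV cs) = pvBktV 2 cs := by
    unfold pvRawV pvBktV pvOneV
    rw [pvFlatMap_single, List.filter_filter]
    exact List.filter_congr (fun x _ => by
      by_cases hp : PySem.Str.isIn "peak" (PySem.Str.lower x) <;>
      by_cases hw : PySem.Str.startswith (PySem.Str.lower x) "voltage" <;>
        simp_all [pvScoreA, pvIdxV, pvPeakB])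
  have h3 : List.filter (fun x => (pvScoreA "voltage" x).1 == 1 && (pvScoreA "voltage" x).2 == 1) (pvRawV cs) = pvBktV 3 cs := by
    unfold pvRawV pvBktV pvOneV
    rw [pvFlatMap_single, List.filter_filter]
    exact List.filter_congr (fun x _ => by
      by_cases hp : PySem.Str.isIn "peak" (PySem.Str.lower x) <;>
      by_cases hw : PySem.Str.startswith (PySem.Str.lower x) "voltage" <;>
        simp_all [pvScoreA, pvIdxV, pvPeakB])
  rw [pvSortRoleA, pvSorted2_buckets _ _
      (fun x => by simp only [pvScoreA]; split_ifs <;> simp)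
      (fun x => by simp only [pvScoreA]; split_ifs <;> simp),
    h0, h1, h2, h3]

-- sorting the raw "current" candidates is bucket concatenation
theorem pvSortC (cs : List String) :
    pvSortRoleA "current" (pvRawC cs) = pvBktC 0 cs ++ pvBktC 1 cs ++ pvBktC 2 cs ++ pvBktC 3 cs := by
  have h0 : List.filter (fun x => (pvScoreA "current" x).1 == 0 && (pvScoreA "current" x).2 == 0) (pvRawC cs) = pvBktC 0 cs := by
    unfold pvRawC pvBktC
    rw [List.filter_flatMap]
    exact pvFlatMap_congr (fun x => by
      by_cases hm : pvMatch pvCurrentHints x <;> by_cases hs : pvSuffA x <;>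
      by_cases hp : PySem.Str.isIn "peak" (PySem.Str.lower x) <;>
      by_cases hw : PySem.Str.startswith (PySem.Str.lower x) "current" <;>
        simp_all [pvOneC, pvScoreA, pvIdxC, pvPeakB]) cs
  have h1 : List.filter (fun x => (pvScoreA "current" x).1 == 0 && (pvScoreA "current" x).2 == 1) (pvRawC cs) = pvBktC 1 cs := by
    unfold pvRawC pvBktC
    rw [List.filter_flatMap]
    exact pvFlatMap_congr (fun x => by
      by_cases hm : pvMatch pvCurrentHints x <;> by_cases hs : pvSuffA x <;>
      by_cases hp : PySem.Str.isIn "peak" (PySem.Str.lower x) <;>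
      by_cases hw : PySem.Str.startswith (PySem.Str.lower x) "current" <;>
        simp_all [pvOneC, pvScoreA, pvIdxC, pvPeakB]) cs
  have h2 : List.filter (fun x => (pvScoreA "current" x).1 == 1 && (pvScoreA "current" x).2 == 0) (pvRawC cs) = pvBktC 2 cs := by
    unfold pvRawC pvBktC
    rw [List.filter_flatMap]
    exact pvFlatMap_congr (fun x => by
      by_cases hm : pvMatch pvCurrentHints x <;> by_cases hs : pvSuffA x <;>
      by_cases hp : PySem.Str.isIn "peak" (PySem.Str.lower x) <;>
      by_cases hw : PySem.Str.startswith (PySem.Str.lower x) "current" <;>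
        simp_all [pvOneC, pvScoreA, pvIdxC, pvPeakB]) cs
  have h3 : List.filter (fun x => (pvScoreA "current" x).1 == 1 && (pvScoreA "current" x).2 == 1) (pvRawC cs) = pvBktC 3 cs := by
    unfold pvRawC pvBktC
    rw [List.filter_flatMap]
    exact pvFlatMap_congr (fun x => by
      by_cases hm : pvMatch pvCurrentHints x <;> by_cases hs : pvSuffA x <;>
      by_cases hp : PySem.Str.isIn "peak" (PySem.Str.lower x) <;>
      by_cases hw : PySem.Str.startswith (PySem.Str.lower x) "current" <;>
        simp_all [pvOneC, pvScoreA, pvIdxC, pvPeakB]) cs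
  rw [pvSortRoleA, pvSorted2_buckets _ _
      (fun x => by simp only [pvScoreA]; split_ifs <;> simp)
      (fun x => by simp only [pvScoreA]; split_ifs <;> simp),
    h0, h1, h2, h3]

-- sorting the raw "magnetic" candidates is bucket concatenation
theorem pvSortM (cs : List String) :
    pvSortRoleA "magnetic" (pvRawM cs) = pvBktM 0 cs ++ pvBktM 1 cs ++ pvBktM 2 cs ++ pvBktM 3 cs := by
  have h0 : List.filter (fun x => (pvScoreA "magnetic" x).1 == 0 && (pvScoreA "magnetic" x).2 == 0) (pvRawM cs) = pvBktM 0 cs := by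
    unfold pvRawM pvBktM
    rw [List.filter_flatMap]
    exact pvFlatMap_congr (fun x => by
      by_cases hm : pvMatch pvMagneticHints x <;> by_cases hs : pvStripB x <;>
      by_cases hp : PySem.Str.isIn "peak" (PySem.Str.lower x) <;>
      by_cases hw : PySem.Str.startswith (PySem.Str.lower x) "hall" <;>
        simp_all [pvOneM, pvScoreA, pvIdxM, pvPeakB]) cs
  have h1 : List.filter (fun x => (pvScoreA "magnetic" x).1 == 0 && (pvScoreA "magnetic" x).2 == 1) (pvRawM cs) = pvBktM 1 cs := by
    unfold pvRawM pvBktM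
    rw [List.filter_flatMap]
    exact pvFlatMap_congr (fun x => by
      by_cases hm : pvMatch pvMagneticHints x <;> by_cases hs : pvStripB x <;>
      by_cases hp : PySem.Str.isIn "peak" (PySem.Str.lower x) <;>
      by_cases hw : PySem.Str.startswith (PySem.Str.lower x) "hall" <;>
        simp_all [pvOneM, pvScoreA, pvIdxM, pvPeakB]) cs
  have h2 : List.filter (fun x => (pvScoreA "magnetic" x).1 == 1 && (pvScoreA "magnetic" x).2 == 0) (pvRawM cs) = pvBktM 2 cs := by
    unfold pvRawM pvBktM
    rw [List.filter_flatMap]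
    exact pvFlatMap_congr (fun x => by
      by_cases hm : pvMatch pvMagneticHints x <;> by_cases hs : pvStripB x <;>
      by_cases hp : PySem.Str.isIn "peak" (PySem.Str.lower x) <;>
      by_cases hw : PySem.Str.startswith (PySem.Str.lower x) "hall" <;>
        simp_all [pvOneM, pvScoreA, pvIdxM, pvPeakB]) cs
  have h3 : List.filter (fun x => (pvScoreA "magnetic" x).1 == 1 && (pvScoreA "magnetic" x).2 == 1) (pvRawM cs) = pvBktM 3 cs := by
    unfold pvRawM pvBktM
    rw [List.filter_flatMap]
    exact pvFlatMap_congr (fun x => by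
      by_cases hm : pvMatch pvMagneticHints x <;> by_cases hs : pvStripB x <;>
      by_cases hp : PySem.Str.isIn "peak" (PySem.Str.lower x) <;>
      by_cases hw : PySem.Str.startswith (PySem.Str.lower x) "hall" <;>
        simp_all [pvOneM, pvScoreA, pvIdxM, pvPeakB]) cs
  rw [pvSortRoleA, pvSorted2_buckets _ _
      (fun x => by simp only [pvScoreA]; split_ifs <;> simp)
      (fun x => by simp only [pvScoreA]; split_ifs <;> simp),
    h0, h1, h2, h3]

-- ===== VERDICT (by name: the statement is the Claim_ definition above) =====
theorem infer_column_roles_spec : Claim_equal_infer_column_roles := by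
  intro columns _
  unfold Spec_infer_column_roles
  show infer_column_roles columns = infer_column_roles_alt columns
  simp only [infer_column_roles, infer_column_roles_alt]
  rw [pvLoopA columns [] [] [] [],
    pvLoopB columns [] [] [] [] [] [] [] [] [] [] [] [] []]
  simp only [List.nil_append, PVQ.cat]
  simp only [PySem.Dict.keys, List.map_cons, List.map_nil, List.foldl_cons, List.foldl_nil]
  simp [PySem.Dict.insert, PySem.Dict.contains, PySem.Dict.getD, PySem.Dict.get?,
    pvDedupeA_eq, pvSortT, pvSortV, pvSortC, pvSortM]
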